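-- pv_equiv track=rewrite | github.com/DipesThapa/PortScanner | portscanner/cli.py | _tokenize_scripts
-- ===== SOURCE A (Python) =====
-- from typing import Dict, List, Optional, Sequence
--
-- def _tokenize_scripts(values: Sequence[str]) -> List[str]:
--     scripts: List[str] = []
--     for value in values:
--         for part in value.split(","):
--             part = part.strip()
--             if part:
--                 scripts.append(part)
--     return scripts
-- ===== SOURCE B (Python) =====
-- from typing import List, Sequence
--
-- def _tokenize_scripts(values: Sequence[str]) -> List[str]:
--     scripts: List[str] = []
--     for value in values:
--         cur: List[str] = []    # confirmed token characters (left-trimmed, ends non-space)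
--         pend: List[str] = []   # run of whitespace not yet known to be interior
--         for ch in value:
--             if ch == ',':
--                 if cur:
--                     scripts.append(''.join(cur))
--                 cur = []
--                 pend = []
--             elif ch.isspace():
--                 if cur:
--                     pend.append(ch)
--             else:
--                 cur.extend(pend)
--                 cur.append(ch)
--                 pend = []
--         if cur:
--             scripts.append(''.join(cur))
--     return scripts
-- ===== Notes on version B (the rewrite author's own statement) =====
-- stated objective: alternative
-- what changed: Replaces A's split/strip/filter string-method pipeline with a hand-written single-pass character state machine that builds each token incrementally (leading whitespace skipped, interior whitespace buffered until the next non-space, commas flush), never calling split or strip.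
import Mathlib
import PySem

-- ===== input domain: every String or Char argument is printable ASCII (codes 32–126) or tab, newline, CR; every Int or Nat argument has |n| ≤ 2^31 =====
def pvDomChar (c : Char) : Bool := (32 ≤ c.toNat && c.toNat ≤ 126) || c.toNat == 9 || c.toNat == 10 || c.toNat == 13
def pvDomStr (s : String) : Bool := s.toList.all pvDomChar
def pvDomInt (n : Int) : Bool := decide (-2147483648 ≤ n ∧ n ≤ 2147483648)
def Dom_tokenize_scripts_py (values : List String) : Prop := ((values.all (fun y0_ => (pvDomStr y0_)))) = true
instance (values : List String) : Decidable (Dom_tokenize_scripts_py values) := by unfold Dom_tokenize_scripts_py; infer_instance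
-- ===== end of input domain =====

-- B replaces A's split/strip/filter pipeline by a hand-written single-pass character
-- state machine (commas flush, leading whitespace skipped, interior whitespace buffered);
-- alternative decomposition, same cost.

-- ===== PORT A =====
-- value.split(",") — the separator is the nonempty literal ",", so Python never raises;
-- this is exact: PySem.Chars.splitOn is the sep ≠ "" form of str.split.
def pySplitComma (s : String) : List String :=
  (PySem.Chars.splitOn s.toList ",".toList).map String.ofList

def tokenize_scripts_py (values : List String) : List String :=
  values.foldl (fun scripts value =>
    (pySplitComma value).foldl (fun scripts part =>
      let part := PySem.Str.strip part
      if part ≠ "" then scripts ++ [part] else scripts) scripts) []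

-- ===== PORT B =====
-- the inner character loop of Source B: state (cur, pend), flush at ',' and at end of value
def scanVal : List Char → List Char → List Char → List String → List String
  | [], cur, _pend, scripts =>
      if cur ≠ [] then scripts ++ [String.ofList cur] else scripts
  | c :: rest, cur, pend, scripts =>
      if c = ',' then
        scanVal rest [] [] (if cur ≠ [] then scripts ++ [String.ofList cur] else scripts)
      else if PySem.Chars.isspace c then
        scanVal rest cur (if cur ≠ [] then pend ++ [c] else pend) scripts
      else
        scanVal rest (cur ++ pend ++ [c]) [] scripts

def tokenize_scripts_py_alt (values : List String) : List String :=
  values.foldl (fun scripts value => scanVal value.toList [] [] scripts) []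

-- ===== PRECONDITION & SPEC =====
def Spec_tokenize_scripts_py (values : List String) (out : List String) : Prop := out = tokenize_scripts_py_alt values
instance (values : List String) (out : List String) : Decidable (Spec_tokenize_scripts_py values out) := by unfold Spec_tokenize_scripts_py; infer_instance

-- ===== CLAIM (what is proved, stated in full; the proofs are below) =====
def Claim_equal_tokenize_scripts_py : Prop := ∀ (values : List String), Dom_tokenize_scripts_py values → Spec_tokenize_scripts_py values (tokenize_scripts_py values)

-- ===== LEMMAS AND PROOFS =====

-- clean fuel-free reading of splitting on a single comma
def split1 : List Char → List (List Char)
  | [] => [[]]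
  | c :: rest => if c = ',' then [] :: split1 rest else (split1 rest).modifyHead (c :: ·)

-- the strip-filtered tokens of one comma-separated chunk list
def tokens (x : List Char) : List (List Char) :=
  ((split1 x).map PySem.Chars.strip).filter (fun p => p ≠ [])

theorem split1_ne_nil (l : List Char) : split1 l ≠ [] := by
  induction l with
  | nil => simp [split1]
  | cons c rest ih =>
    simp only [split1]
    split
    · simp
    · cases h : split1 rest with
      | nil => exact absurd h ih
      | cons a t => simp [List.modifyHead]

theorem go_eq (l : List Char) : ∀ (fuel : Nat) (cur : List Char) (acc : List (List Char)),
    l.length ≤ fuel →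
    PySem.Chars.splitOn.go [','] fuel l cur acc
      = acc.reverse ++ (split1 l).modifyHead (cur.reverse ++ ·) := by
  induction l with
  | nil =>
    intro fuel cur acc _
    cases fuel <;> simp [PySem.Chars.splitOn.go, split1, List.modifyHead]
  | cons c rest ih =>
    intro fuel cur acc hf
    cases fuel with
    | zero => simp at hf
    | succ fuel =>
      simp only [List.length_cons, Nat.succ_le_succ_iff] at hf
      by_cases hc : c = ','
      · subst hc
        have h : List.isPrefixOf [','] (',' :: rest) = true := by simp [List.isPrefixOf]
        simp only [PySem.Chars.splitOn.go, h, if_pos, List.length_cons, List.length_nil,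
          List.drop_succ_cons, List.drop_zero]
        rw [ih fuel [] (cur.reverse :: acc) hf]
        simp only [split1, if_true, List.reverse_cons, List.reverse_nil, List.nil_append,
          List.append_assoc, List.modifyHead]
        cases split1 rest <;> simp
      · have h : List.isPrefixOf [','] (c :: rest) = false := by
          simp [List.isPrefixOf]; exact fun h => hc h.symm
        simp only [PySem.Chars.splitOn.go, h, Bool.false_eq_true, if_false]
        rw [ih fuel (c :: cur) acc hf]
        simp only [split1, hc, if_false]
        cases h' : split1 rest with
        | nil => exact absurd h' (split1_ne_nil rest)
        | cons a t => simp [List.modifyHead]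

theorem splitOn_eq_split1 (l : List Char) : PySem.Chars.splitOn l [','] = split1 l := by
  unfold PySem.Chars.splitOn
  rw [go_eq l (l.length + 1) [] [] (by omega)]
  cases h : split1 l with
  | nil => exact absurd h (split1_ne_nil l)
  | cons a t => simp [List.modifyHead]

theorem split1_append (a b : List Char) : split1 (a ++ ',' :: b) = split1 a ++ split1 b := by
  induction a with
  | nil => simp [split1]
  | cons c rest ih =>
    by_cases hc : c = ','
    · simp [split1, hc, ih]
    · simp only [List.cons_append, split1, hc, if_false, ih]
      cases h : split1 rest with
      | nil => exact absurd h (split1_ne_nil rest)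
      | cons x t => simp [List.modifyHead]

theorem split1_no_comma (a : List Char) (h : ',' ∉ a) : split1 a = [a] := by
  induction a with
  | nil => rfl
  | cons c rest ih =>
    simp only [List.mem_cons, not_or] at h
    simp [split1, Ne.symm h.1, ih h.2, List.modifyHead]

-- A's inner loop over the parts of one value appends the nonempty strips
theorem inner_eq (parts : List String) (acc : List String) :
    parts.foldl (fun scripts part =>
        let part := PySem.Str.strip part
        if part ≠ "" then scripts ++ [part] else scripts) acc
      = acc ++ (parts.map PySem.Str.strip).filter (fun p => p ≠ "") := by
  induction parts generalizing acc with
  | nil => simp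
  | cons p ps ih =>
    simp only [List.foldl_cons, List.map_cons, List.filter_cons]
    by_cases h : PySem.Str.strip p ≠ ""
    · rw [ih]; simp [h]
    · rw [ih]; simp [h]

-- A flattens to a flatMap of per-value strip-filtered splits
theorem a_fold_eq (values : List String) : ∀ (acc : List String),
    values.foldl (fun scripts value =>
      (pySplitComma value).foldl (fun scripts part =>
        let part := PySem.Str.strip part
        if part ≠ "" then scripts ++ [part] else scripts) scripts) acc
      = acc ++ values.flatMap (fun v => ((pySplitComma v).map PySem.Str.strip).filter (fun p => p ≠ "")) := by
  induction values with
  | nil => simp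
  | cons v vs ih =>
    intro acc
    simp only [List.foldl_cons, List.flatMap_cons]
    rw [inner_eq, ih]
    simp

theorem a_eq_flatMap (values : List String) :
    tokenize_scripts_py values
      = values.flatMap (fun v => ((pySplitComma v).map PySem.Str.strip).filter (fun p => p ≠ "")) := by
  unfold tokenize_scripts_py
  rw [a_fold_eq]
  simp

-- per-value, A's pipeline is (tokens …).map ofList
theorem a_value_eq_tokens (v : String) :
    ((pySplitComma v).map PySem.Str.strip).filter (fun p => p ≠ "")
      = (tokens v.toList).map String.ofList := by
  simp only [pySplitComma, tokens, show (",".toList : List Char) = [','] from rfl,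
    splitOn_eq_split1, List.map_map]
  rw [show (PySem.Str.strip ∘ String.ofList) = (String.ofList ∘ PySem.Chars.strip) by
    funext x; simp [PySem.Str.strip]]
  rw [List.filter_map, List.filter_map, List.map_map]
  refine congrArg _ (List.filter_congr ?_)
  intro x _
  have : (String.ofList (PySem.Chars.strip x) = "") ↔ PySem.Chars.strip x = [] := by
    constructor
    · intro h
      have := congrArg String.toList h
      simpa using this
    · intro h; rw [h]
  simp [Function.comp, this]

-- helpers about whitespace prefixes/suffixes
theorem dropWhile_all {p : Char → Bool} (a b : List Char) (h : ∀ c ∈ a, p c = true) :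
    List.dropWhile p (a ++ b) = List.dropWhile p b := by
  induction a with
  | nil => rfl
  | cons c rest ih =>
    simp only [List.cons_append, List.dropWhile_cons, h c (by simp), if_true]
    exact ih fun c hc => h c (by simp [hc])

theorem dropWhile_fixed_append {p : Char → Bool} (a b : List Char)
    (ha : a ≠ []) (h : List.dropWhile p a = a) :
    List.dropWhile p (a ++ b) = a ++ b := by
  cases a with
  | nil => exact absurd rfl ha
  | cons c rest =>
    have hc : p c = false := by
      by_contra hp
      rw [Bool.not_eq_false] at hp
      rw [List.dropWhile_cons, if_pos hp] at h
      have hlen := List.length_dropWhile_le p rest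
      rw [h] at hlen
      simp at hlen
    simp [hc]

-- strip (cur ++ pend) = cur under the scanner's invariants
theorem strip_cur_pend (cur pend : List Char)
    (hcp : cur = [] → pend = [])
    (hws : ∀ c ∈ pend, PySem.Chars.isspace c = true)
    (hl : PySem.Chars.lstrip cur = cur)
    (hr : PySem.Chars.rstrip cur = cur) :
    PySem.Chars.strip (cur ++ pend) = cur := by
  cases hcur : cur with
  | nil =>
    subst hcur
    simp [hcp rfl, PySem.Chars.strip, PySem.Chars.lstrip, PySem.Chars.rstrip]
  | cons c rest =>
    rw [← hcur]
    have hne : cur ≠ [] := by simp [hcur]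
    unfold PySem.Chars.strip PySem.Chars.lstrip
    rw [dropWhile_fixed_append cur pend hne hl]
    unfold PySem.Chars.rstrip
    rw [List.reverse_append, dropWhile_all pend.reverse cur.reverse
      (fun c hc => hws c (by simpa using hc))]
    unfold PySem.Chars.rstrip at hr
    rw [show List.dropWhile PySem.Chars.isspace cur.reverse = cur.reverse by
      have := congrArg List.reverse hr
      simpa using this]
    simp

-- the scanner computes the strip-filtered tokens of cur ++ pend ++ l
theorem scan_eq (l : List Char) : ∀ (cur pend : List Char) (scripts : List String),
    (cur = [] → pend = []) →
    (∀ c ∈ pend, PySem.Chars.isspace c = true) →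
    (',' ∉ cur) →
    PySem.Chars.lstrip cur = cur →
    PySem.Chars.rstrip cur = cur →
    scanVal l cur pend scripts
      = scripts ++ (tokens (cur ++ pend ++ l)).map String.ofList := by
  induction l with
  | nil =>
    intro cur pend scripts hcp hws hnc hl hr
    have hpc : ',' ∉ pend := fun h => absurd (hws ',' h) (by decide)
    have : split1 (cur ++ pend) = [cur ++ pend] :=
      split1_no_comma _ (by simp [hnc, hpc])
    simp only [scanVal, List.append_nil, tokens, this, List.map_cons, List.map_nil,
      strip_cur_pend cur pend hcp hws hl hr, List.filter]
    by_cases h : cur = [] <;> simp [h]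
  | cons c rest ih =>
    intro cur pend scripts hcp hws hnc hl hr
    by_cases hc : c = ','
    · subst hc
      have hpc : ',' ∉ pend := fun h => absurd (hws ',' h) (by decide)
      have hsp : split1 (cur ++ pend ++ ',' :: rest) = (cur ++ pend) :: split1 rest := by
        rw [List.append_assoc] at *
        rw [show cur ++ (pend ++ ',' :: rest) = (cur ++ pend) ++ ',' :: rest by simp,
          split1_append, split1_no_comma _ (by simp [hnc, hpc])]
        simp
      simp only [scanVal]
      rw [ih [] [] _ (fun _ => rfl) (by simp) (by simp)
        (by simp [PySem.Chars.lstrip]) (by simp [PySem.Chars.rstrip])]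
      simp only [List.nil_append, tokens, hsp, List.map_cons, List.filter,
        strip_cur_pend cur pend hcp hws hl hr]
      by_cases h : cur = [] <;> simp [h]
    · by_cases hws' : PySem.Chars.isspace c = true
      · simp only [scanVal, hc, if_false, hws', if_true]
        by_cases h : cur = []
        · -- leading whitespace is dropped: tokens (c :: rest) = tokens rest
          subst h
          have hp := hcp rfl; subst hp
          rw [if_neg (fun h => h rfl)]
          rw [ih [] [] scripts (fun _ => rfl) (by simp) (by simp) hl hr]
          simp only [List.nil_append]
          refine congrArg _ (congrArg _ ?_)
          unfold tokens
          rw [show split1 (c :: rest) = (split1 rest).modifyHead (c :: ·) by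
            simp [split1, hc]]
          cases hsr : split1 rest with
          | nil => exact absurd hsr (split1_ne_nil rest)
          | cons h t =>
            simp only [List.modifyHead, List.map_cons]
            rw [show PySem.Chars.strip (c :: h) = PySem.Chars.strip h by
              simp [PySem.Chars.strip, PySem.Chars.lstrip, hws']]
        · rw [if_pos h, ih cur (pend ++ [c]) scripts (fun hh => absurd hh h)
            (by intro x hx; rcases List.mem_append.mp hx with hx | hx
                · exact hws x hx
                · simp at hx; subst hx; exact hws') hnc hl hr]
          simp [List.append_assoc]
      · simp only [scanVal, hc, if_false, hws', if_false]
        have hb : Bool.not (PySem.Chars.isspace c) = true := by simp [hws']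
        rw [ih (cur ++ pend ++ [c]) [] scripts (by simp) (by simp)
          (by intro hmem
              rcases List.mem_append.mp hmem with hmem | hmem
              · rcases List.mem_append.mp hmem with hmem | hmem
                · exact hnc hmem
                · exact absurd (hws ',' hmem) (by decide)
              · simp at hmem; exact hc hmem.symm)
          (by by_cases h : cur = []
              · subst h; have := hcp rfl; subst this
                simp [PySem.Chars.lstrip, hws']
              · unfold PySem.Chars.lstrip
                rw [List.append_assoc,
                  dropWhile_fixed_append cur (pend ++ [c]) h hl])
          (by unfold PySem.Chars.rstrip
              simp only [List.reverse_append, List.reverse_cons, List.reverse_nil,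
                List.nil_append, List.singleton_append, List.dropWhile_cons, hws']
              simp)]
        simp [List.append_assoc]

-- B flattens to the same flatMap
theorem b_fold_eq (values : List String) : ∀ (acc : List String),
    values.foldl (fun scripts value => scanVal value.toList [] [] scripts) acc
      = acc ++ values.flatMap (fun v => (tokens v.toList).map String.ofList) := by
  induction values with
  | nil => simp
  | cons v vs ih =>
    intro acc
    simp only [List.foldl_cons, List.flatMap_cons]
    rw [scan_eq v.toList [] [] acc (fun _ => rfl) (by simp) (by simp)
      (by simp [PySem.Chars.lstrip]) (by simp [PySem.Chars.rstrip]), ih]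
    simp

-- ===== VERDICT (by name: the statement is the Claim_ definition above) =====
theorem tokenize_scripts_py_spec : Claim_equal_tokenize_scripts_py := by
  intro values _
  unfold Spec_tokenize_scripts_py tokenize_scripts_py_alt
  rw [a_eq_flatMap, b_fold_eq]
  simp only [List.nil_append]
  simp only [a_value_eq_tokens]
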